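-- pv_equiv track=rewrite | github.com/toxiii91/GS15_Project | cobra_test.py | feistel_function
-- ===== SOURCE A (Python) =====
-- from math import gcd
--
-- def feistel_function(right_half, key):
--     byte = right_half & 0xFF
--     reversed_bits = int('{:08b}'.format(byte)[::-1], 2)
--     to_invert = (reversed_bits + 1) % 257
--
--     if gcd(to_invert, 257) != 1:
--         transformed = 0
--     else:
--         transformed = (pow(to_invert, -1, 257) - 1) % 256
--
--     permutation = [7, 6, 5, 4, 3, 2, 1, 0]
--     permuted = sum(((transformed >> i) & 1) << permutation[i] for i in range(8))
--
--     return permuted ^ (key & 0xFF)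
-- ===== SOURCE B (Python) =====
-- _SBOX = [
--     0, 128, 106, 192, 201, 181, 44, 224, 30, 100, 37, 90, 40, 150, 206, 240,
--     227, 143, 21, 178, 69, 18, 197, 173, 226, 148, 152, 203, 239, 231, 8, 248,
--     102, 113, 41, 71, 193, 10, 216, 217, 12, 34, 126, 137, 6, 98, 161, 86,
--     141, 241, 111, 202, 228, 204, 251, 101, 67, 119, 233, 115, 92, 132, 219, 252,
--     170, 179, 151, 56, 87, 20, 97, 35, 167, 96, 250, 133, 190, 236, 164, 108,
--     93, 134, 232, 145, 160, 191, 47, 68, 183, 131, 11, 177, 60, 80, 209, 171,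
--     73, 70, 45, 120, 9, 55, 32, 229, 189, 242, 2, 230, 79, 125, 172, 50,
--     238, 33, 207, 59, 117, 116, 212, 57, 99, 174, 180, 194, 166, 109, 42, 254,
--     1, 213, 146, 89, 61, 75, 81, 156, 198, 43, 139, 138, 196, 48, 222, 17,
--     205, 83, 130, 176, 25, 253, 13, 66, 26, 223, 200, 246, 135, 210, 185, 182,
--     84, 46, 175, 195, 78, 244, 124, 72, 187, 208, 64, 95, 110, 23, 121, 162,
--     147, 91, 19, 65, 122, 5, 159, 88, 220, 158, 235, 168, 199, 104, 76, 85,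
--     3, 36, 123, 163, 140, 22, 136, 188, 154, 4, 51, 27, 53, 144, 14, 114,
--     169, 94, 157, 249, 118, 129, 221, 243, 38, 39, 245, 62, 184, 214, 142, 153,
--     7, 247, 24, 16, 52, 103, 107, 29, 82, 58, 237, 186, 77, 234, 112, 28,
--     15, 49, 105, 215, 165, 218, 155, 225, 31, 211, 74, 54, 63, 149, 127, 255,
-- ]
--
--
-- def feistel_function(right_half, key):
--     # The byte-to-byte core (bit-reverse, +1, inverse mod 257, -1 mod 256,
--     # bit-reverse) is a fixed substitution; implement it as a precomputed
--     # 256-entry S-box lookup, the standard way to ship such a byte map.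
--     return _SBOX[right_half & 0xFF] ^ (key & 0xFF)
-- ===== Notes on version B (the rewrite author's own statement) =====
-- stated objective: alternative
-- what changed: B replaces the whole per-call pipeline (string-format bit reversal, gcd test, pow(x,-1,257), permutation sum) by a single precomputed 256-entry S-box table lookup followed by the key xor.
import Mathlib
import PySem

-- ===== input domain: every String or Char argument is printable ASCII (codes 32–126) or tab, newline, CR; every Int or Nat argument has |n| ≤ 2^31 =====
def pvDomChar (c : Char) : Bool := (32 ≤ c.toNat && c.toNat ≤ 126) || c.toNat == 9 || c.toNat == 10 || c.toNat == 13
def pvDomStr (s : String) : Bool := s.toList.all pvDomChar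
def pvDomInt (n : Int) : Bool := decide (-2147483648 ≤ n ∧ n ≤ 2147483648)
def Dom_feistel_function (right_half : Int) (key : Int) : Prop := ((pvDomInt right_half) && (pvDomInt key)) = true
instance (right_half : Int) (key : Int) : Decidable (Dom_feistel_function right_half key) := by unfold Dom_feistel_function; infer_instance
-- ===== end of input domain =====

-- B replaces A's whole per-call pipeline (format/parse bit reversal, gcd, modular inverse,
-- permutation sum) by one precomputed 256-entry S-box lookup plus the key xor.

-- ===== PORT A =====

-- hand port of '{:08b}'.format(byte): binary digits of byte zero-padded on the left to width 8
-- (exact for 0 ≤ byte < 256, the only values A formats)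
def pvFmt08b (n : Int) : List Char :=
  let ds := PySem.Int.toBinChars n
  List.replicate (8 - ds.length) '0' ++ ds

-- hand port of pow(a, -1, 257): the modular inverse of a mod 257 (exact whenever gcd(a,257)=1,
-- which A's branch guarantees before calling it)
def pvPowNegOneMod257 (a : Int) : Int :=
  Int.ofNat (((List.range 257).find? (fun x => PySem.Int.mod (a * Int.ofNat x) 257 == 1)).getD 0)

def feistel_function (right_half : Int) (key : Int) : Int :=
  let byte := PySem.Int.band right_half 255
  -- int('{:08b}'.format(byte)[::-1], 2); the parse never fails (binary digits), so getD is never hit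
  let reversed_bits :=
    (PySem.Int.ofCharsBase? ((PySem.List.slice? (pvFmt08b byte) none none (-1)).getD []) 2).getD 0
  let to_invert := PySem.Int.mod (reversed_bits + 1) 257
  let transformed :=
    if Int.gcd to_invert 257 ≠ 1 then 0
    else PySem.Int.mod (pvPowNegOneMod257 to_invert - 1) 256
  let permutation : List Int := [7, 6, 5, 4, 3, 2, 1, 0]
  let permuted :=
    ((PySem.List.pyRange 0 8 1).map
      (fun i => (PySem.Int.band (transformed >>> i.toNat) 1) <<< (PySem.List.pyGetD permutation i 0).toNat)).sum
  PySem.Int.bxor permuted (PySem.Int.band key 255)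

-- ===== PORT B =====

-- Source B's module-level precomputed substitution table _SBOX
def pvSbox : List Int := [
  0, 128, 106, 192, 201, 181, 44, 224, 30, 100, 37, 90, 40, 150, 206, 240,
  227, 143, 21, 178, 69, 18, 197, 173, 226, 148, 152, 203, 239, 231, 8, 248,
  102, 113, 41, 71, 193, 10, 216, 217, 12, 34, 126, 137, 6, 98, 161, 86,
  141, 241, 111, 202, 228, 204, 251, 101, 67, 119, 233, 115, 92, 132, 219, 252,
  170, 179, 151, 56, 87, 20, 97, 35, 167, 96, 250, 133, 190, 236, 164, 108,
  93, 134, 232, 145, 160, 191, 47, 68, 183, 131, 11, 177, 60, 80, 209, 171,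
  73, 70, 45, 120, 9, 55, 32, 229, 189, 242, 2, 230, 79, 125, 172, 50,
  238, 33, 207, 59, 117, 116, 212, 57, 99, 174, 180, 194, 166, 109, 42, 254,
  1, 213, 146, 89, 61, 75, 81, 156, 198, 43, 139, 138, 196, 48, 222, 17,
  205, 83, 130, 176, 25, 253, 13, 66, 26, 223, 200, 246, 135, 210, 185, 182,
  84, 46, 175, 195, 78, 244, 124, 72, 187, 208, 64, 95, 110, 23, 121, 162,
  147, 91, 19, 65, 122, 5, 159, 88, 220, 158, 235, 168, 199, 104, 76, 85,
  3, 36, 123, 163, 140, 22, 136, 188, 154, 4, 51, 27, 53, 144, 14, 114,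
  169, 94, 157, 249, 118, 129, 221, 243, 38, 39, 245, 62, 184, 214, 142, 153,
  7, 247, 24, 16, 52, 103, 107, 29, 82, 58, 237, 186, 77, 234, 112, 28,
  15, 49, 105, 215, 165, 218, 155, 225, 31, 211, 74, 54, 63, 149, 127, 255]

def feistel_function_alt (right_half : Int) (key : Int) : Int :=
  -- _SBOX[right_half & 0xFF] ^ (key & 0xFF); the index is always in range, so getD is never hit
  PySem.Int.bxor ((PySem.List.pyGet? pvSbox (PySem.Int.band right_half 255)).getD 0)
    (PySem.Int.band key 255)

-- ===== PRECONDITION & SPEC =====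
def Spec_feistel_function (right_half : Int) (key : Int) (out : Int) : Prop := out = feistel_function_alt right_half key
instance (right_half : Int) (key : Int) (out : Int) : Decidable (Spec_feistel_function right_half key out) := by unfold Spec_feistel_function; infer_instance

-- ===== CLAIM =====
def Claim_equal_feistel_function : Prop := ∀ (right_half : Int) (key : Int), Dom_feistel_function right_half key → Spec_feistel_function right_half key (feistel_function right_half key)

-- ===== LEMMAS AND PROOFS =====

-- the byte→byte core of A (everything between 'byte = right_half & 0xFF' and the final xor)
def pvCoreA (byte : Int) : Int :=
  let reversed_bits :=
    (PySem.Int.ofCharsBase? ((PySem.List.slice? (pvFmt08b byte) none none (-1)).getD []) 2).getD 0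
  let to_invert := PySem.Int.mod (reversed_bits + 1) 257
  let transformed :=
    if Int.gcd to_invert 257 ≠ 1 then 0
    else PySem.Int.mod (pvPowNegOneMod257 to_invert - 1) 256
  let permutation : List Int := [7, 6, 5, 4, 3, 2, 1, 0]
  ((PySem.List.pyRange 0 8 1).map
    (fun i => (PySem.Int.band (transformed >>> i.toNat) 1) <<< (PySem.List.pyGetD permutation i 0).toNat)).sum

theorem pvFeistelA_eq (rh k : Int) :
    feistel_function rh k = PySem.Int.bxor (pvCoreA (PySem.Int.band rh 255)) (PySem.Int.band k 255) := rfl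

set_option maxRecDepth 100000 in
theorem pvCore_eq : ∀ n : Fin 256,
    pvCoreA (n : Int) = (PySem.List.pyGet? pvSbox (n : Int)).getD 0 := by decide

-- Python's a & 255 is a mod 256 (also for negative a)
theorem pvBand255 (a : Int) : PySem.Int.band a 255 = a % 256 := by
  unfold PySem.Int.band
  by_cases h : 0 ≤ a
  · simp only [h, if_true, show (0:Int) ≤ 255 by norm_num]
    rw [show Int.toNat 255 = 255 from rfl]
    have h2 := Nat.and_two_pow_sub_one_eq_mod a.toNat 8
    norm_num at h2
    omega
  · simp only [h, if_false, show (0:Int) ≤ 255 by norm_num, if_true]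
    rw [show Int.toNat 255 = 255 from rfl, Nat.and_comm]
    have h2 : (-a - 1).toNat &&& 255 = (-a - 1).toNat % 256 := by
      simpa using Nat.and_two_pow_sub_one_eq_mod (-a - 1).toNat 8
    omega

-- ===== VERDICT =====
theorem feistel_function_spec : Claim_equal_feistel_function := by
  intro rh k _
  unfold Spec_feistel_function feistel_function_alt
  rw [pvFeistelA_eq]
  have hb : PySem.Int.band rh 255 = rh % 256 := pvBand255 rh
  have h0 : 0 ≤ rh % 256 := Int.emod_nonneg rh (by norm_num)
  have h1 : rh % 256 < 256 := Int.emod_lt_of_pos rh (by norm_num)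
  have := pvCore_eq ⟨(rh % 256).toNat, by omega⟩
  simp only [hb]
  rw [show ((⟨(rh % 256).toNat, by omega⟩ : Fin 256) : Int) = rh % 256 by
        simp [Int.toNat_of_nonneg h0]] at this
  rw [this]
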